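-- pv_equiv track=rewrite | github.com/sockduct/CS101 | chkantisymtrc.py | antisymmetric
-- ===== SOURCE A (Python) =====
-- def rowneqcoln(lst):
--     # Check if # of rows == # of columns
--     # returns True if yes, otherwise no
--     n = len(lst)
--     ##print "n = " + str(n)
--     #
--     for e in lst:  # Check length of each row == number of rows (rows == cols)
--         if len(e) != n:
--             ##print "e = " + str(e)
--             ##print "# Rows != # Columns for this list"
--             return False
--     ##print "# Rows == # Columns for this list"
--     return True
--
-- def antisymmetric(lst):
--     i = 0  # Index
--     rc = 0  # row/column count
--     n = len(lst)  # Number of rows/columns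
--     #
--     if rowneqcoln(lst):
--         while rc < n:  # Check each rol/col combo for matching symmetry
--             i = 0
--             while i < n:
--                 ##print "Comparing list element[" + str(rc) + "][" + str(i) + "] (" + str(lst[rc][i]) + ") with list element[" + str(i) + "][" + str(rc) + "] (" + str(lst[i][rc]) + ")"
--                 if lst[rc][i] != -lst[i][rc]:
--                     return False
--                 i += 1
--             rc += 1
--         return True
--     else:  # Number of rows != number of columns
--         return False
-- ===== SOURCE B (Python) =====
-- def antisymmetric(lst):
--     n = len(lst)
--     if not all(len(row) == n for row in lst):
--         return False
--     neg_t = [[-lst[j][i] for j in range(n)] for i in range(n)]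
--     return lst == neg_t
-- ===== Notes on version B (the rewrite author's own statement) =====
-- stated objective: idiomatic
-- what changed: B checks squareness with all(), materializes the negated transpose as a whole matrix and compares it structurally to lst, instead of A's index-pair probing with nested while loops and early returns.
import Mathlib
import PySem

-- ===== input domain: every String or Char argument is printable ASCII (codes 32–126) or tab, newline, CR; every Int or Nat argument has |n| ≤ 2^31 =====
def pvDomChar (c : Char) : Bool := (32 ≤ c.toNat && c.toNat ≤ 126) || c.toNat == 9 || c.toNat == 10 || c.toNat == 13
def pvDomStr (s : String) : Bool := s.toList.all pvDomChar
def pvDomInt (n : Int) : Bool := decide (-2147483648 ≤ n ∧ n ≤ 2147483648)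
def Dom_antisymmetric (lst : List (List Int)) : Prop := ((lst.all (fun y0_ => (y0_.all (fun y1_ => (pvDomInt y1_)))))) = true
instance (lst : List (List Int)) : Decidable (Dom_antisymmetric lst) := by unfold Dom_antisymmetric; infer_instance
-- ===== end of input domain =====

-- B checks squareness with all(), builds the negated transpose and compares it to lst structurally,
-- replacing A's nested while-loop index-pair probing; same O(n^2) cost, more idiomatic.


-- ===== PORT A =====
-- lst[r][c]; every use below is reached only after the square check, with r,c < len(lst),
-- so the defaults are never taken (indexing is exact on the reached inputs).
def pvGetA (lst : List (List Int)) (r c : Nat) : Int := (lst.getD r []).getD c 0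

def rowneqcoln (lst : List (List Int)) : Bool :=
  lst.all (fun e => e.length == lst.length)

def innerA (lst : List (List Int)) (n rc i : Nat) : Bool :=
  if i < n then
    (if pvGetA lst rc i ≠ -(pvGetA lst i rc) then false
     else innerA lst n rc (i + 1))
  else true
termination_by n - i

def outerA (lst : List (List Int)) (n rc : Nat) : Bool :=
  if rc < n then
    (if innerA lst n rc 0 = false then false
     else outerA lst n (rc + 1))
  else true
termination_by n - rc

def antisymmetric (lst : List (List Int)) : Bool :=
  if rowneqcoln lst then outerA lst lst.length 0 else false

-- ===== PORT B =====
def antisymmetric_alt (lst : List (List Int)) : Bool :=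
  let n := lst.length
  if !(lst.all (fun row => row.length == n)) then false
  else
    -- indices j, i range over [0, n) with the matrix known square: indexing is exact
    let negT := (List.range n).map (fun i => (List.range n).map (fun j => -((lst.getD j []).getD i 0)))
    lst == negT

-- ===== PRECONDITION & SPEC =====
def Spec_antisymmetric (lst : List (List Int)) (out : Bool) : Prop := out = antisymmetric_alt lst
instance (lst : List (List Int)) (out : Bool) : Decidable (Spec_antisymmetric lst out) := by unfold Spec_antisymmetric; infer_instance

-- ===== CLAIM (what is proved, stated in full; the proofs are below) =====
def Claim_equal_antisymmetric : Prop := ∀ (lst : List (List Int)), Dom_antisymmetric lst → Spec_antisymmetric lst (antisymmetric lst)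

-- ===== LEMMAS AND PROOFS =====

lemma innerA_iff (lst : List (List Int)) (n rc : Nat) :
    ∀ d i, d = n - i →
      (innerA lst n rc i = true ↔ ∀ j, i ≤ j → j < n → pvGetA lst rc j = -(pvGetA lst j rc)) := by
  intro d
  induction d with
  | zero =>
    intro i h
    rw [innerA]
    have hi : ¬ i < n := by omega
    simp [hi]
    intro j h1 h2; omega
  | succ d ih =>
    intro i h
    rw [innerA]
    have hi : i < n := by omega
    by_cases hv : pvGetA lst rc i = -(pvGetA lst i rc)
    · simp [hi, hv, ih (i + 1) (by omega)]
      constructor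
      · intro hall j h1 h2
        rcases Nat.eq_or_lt_of_le h1 with rfl | hlt
        · exact hv
        · exact hall j hlt h2
      · intro hall j h1 h2
        exact hall j (by omega) h2
    · simp [hi, hv]
      exact ⟨i, le_refl i, hi, hv⟩

lemma outerA_iff (lst : List (List Int)) (n : Nat) :
    ∀ d rc, d = n - rc →
      (outerA lst n rc = true ↔ ∀ r, rc ≤ r → r < n → innerA lst n r 0 = true) := by
  intro d
  induction d with
  | zero =>
    intro rc h
    rw [outerA]
    have hrc : ¬ rc < n := by omega
    simp [hrc]
    intro r h1 h2; omega
  | succ d ih =>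
    intro rc h
    rw [outerA]
    have hrc : rc < n := by omega
    by_cases hin : innerA lst n rc 0 = true
    · simp [hrc, hin, ih (rc + 1) (by omega)]
      constructor
      · intro hall r h1 h2
        rcases Nat.eq_or_lt_of_le h1 with rfl | hlt
        · exact hin
        · exact hall r hlt h2
      · intro hall r h1 h2
        exact hall r (by omega) h2
    · simp [hrc, hin]
      exact ⟨rc, le_refl rc, hrc, Bool.eq_false_iff.2 hin⟩

lemma A_iff (lst : List (List Int)) (hsq : rowneqcoln lst = true) :
    antisymmetric lst = true ↔
      ∀ r c, r < lst.length → c < lst.length → pvGetA lst r c = -(pvGetA lst c r) := by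
  rw [antisymmetric]
  simp only [hsq, if_true]
  rw [outerA_iff lst lst.length (lst.length - 0) 0 rfl]
  constructor
  · intro hall r c hr hc
    have := (innerA_iff lst lst.length r (lst.length - 0) 0 rfl).1 (hall r (Nat.zero_le r) hr)
    exact this c (Nat.zero_le c) hc
  · intro hall r _ hr
    exact (innerA_iff lst lst.length r (lst.length - 0) 0 rfl).2 (fun j _ hj => hall r j hr hj)

lemma square_row_len (lst : List (List Int)) (hsq : lst.all (fun e => e.length == lst.length) = true)
    {r : Nat} (hr : r < lst.length) : lst[r].length = lst.length := by
  have := List.all_eq_true.1 hsq lst[r] (List.getElem_mem hr)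
  simpa using this

lemma pvGetA_eq (lst : List (List Int)) {r c : Nat} (hr : r < lst.length)
    (hc : c < lst[r].length) : pvGetA lst r c = lst[r][c] := by
  unfold pvGetA
  rw [List.getD_eq_getElem lst [] hr, List.getD_eq_getElem lst[r] 0 hc]

lemma B_iff (lst : List (List Int)) (hsq : lst.all (fun e => e.length == lst.length) = true) :
    antisymmetric_alt lst = true ↔
      ∀ r c, r < lst.length → c < lst.length → pvGetA lst r c = -(pvGetA lst c r) := by
  rw [antisymmetric_alt]
  simp only [hsq, Bool.not_true, Bool.false_eq_true, if_false, beq_iff_eq]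
  constructor
  · intro heq r c hr hc
    have hrlen := square_row_len lst hsq hr
    have hclen := square_row_len lst hsq hc
    have h2 := congrArg (fun L => L[r]?) heq
    simp only [List.getElem?_map, List.getElem?_range, hr,
      List.getElem?_eq_getElem hr, Option.map_some] at h2
    have h2' : lst[r] = List.map (fun j => -(lst.getD j []).getD r 0) (List.range lst.length) :=
      Option.some.inj (by simpa [hr] using h2)
    have h3 := congrArg (fun L => L[c]?) h2'
    have hc1 : c < lst[r].length := by omega
    simp only [List.getElem?_map, List.getElem?_eq_getElem hc1] at h3
    have h3' : lst[r][c] = -(lst.getD c []).getD r 0 :=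
      Option.some.inj (by simpa [hc] using h3)
    rw [pvGetA_eq lst hr hc1, pvGetA_eq lst hc (by omega), h3',
      List.getD_eq_getElem lst [] hc, List.getD_eq_getElem lst[c] 0 (by omega)]
  · intro hall
    apply List.ext_getElem
    · simp
    · intro r h1 h2
      apply List.ext_getElem
      · simp [square_row_len lst hsq h1]
      · intro c hc1 hc2
        have hr : r < lst.length := h1
        have hrlen := square_row_len lst hsq hr
        have hcn : c < lst.length := by omega
        have hthis := hall r c hr hcn
        rw [pvGetA_eq lst hr hc1,
          pvGetA_eq lst hcn (by rw [square_row_len lst hsq hcn]; omega)] at hthis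
        simp only [List.getElem_map, List.getElem_range]
        rw [hthis, List.getD_eq_getElem lst [] hcn,
          List.getD_eq_getElem lst[c] 0 (by rw [square_row_len lst hsq hcn]; omega)]

-- ===== VERDICT (by name: the statement is the Claim_ definition above) =====
theorem antisymmetric_spec : Claim_equal_antisymmetric := by
  intro lst _
  unfold Spec_antisymmetric
  by_cases hsq : lst.all (fun e => e.length == lst.length) = true
  · rw [Bool.eq_iff_iff, A_iff lst hsq, B_iff lst hsq]
  · have h1 : rowneqcoln lst = false := by
      unfold rowneqcoln; exact Bool.eq_false_iff.2 hsq
    rw [antisymmetric, antisymmetric_alt]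
    simp [h1, Bool.eq_false_iff.2 hsq]
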